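-- pv_equiv track=rewrite | github.com/Rav872/A2Z-DSA | Step9.3_Stack_and_queue_problems_monotonic/4.py | count_greater_elements_for_indexes
-- ===== SOURCE A (Python) =====
-- def count_greater_elements_for_indexes(arr, indexes):
--     stack = []
--     result = [0] * len(arr)
--
--     for i in range(len(arr) - 1, -1, -1):
--         while stack and stack[-1] <= arr[i]:
--             stack.pop()
--         count = len(stack)  # Count of elements greater than current element
--         result[i] = count
--         stack.append(arr[i])
--
--     return [result[i] for i in indexes]
-- ===== SOURCE B (Python) =====
-- def count_greater_elements_for_indexes(arr, indexes):
--     # Per-index forward scan with a running maximum: count the "record"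
--     # elements of the suffix arr[i+1:] that exceed the running max,
--     # starting from arr[i].  No stack at all.
--     result = []
--     for i in range(len(arr)):
--         m = arr[i]
--         c = 0
--         for x in arr[i + 1:]:
--             if x > m:
--                 c += 1
--                 m = x
--         result.append(c)
--     return [result[i] for i in indexes]
-- ===== Notes on version B (the rewrite author's own statement) =====
-- stated objective: alternative
-- what changed: Replaces the right-to-left monotonic stack (popping elements <= arr[i] and reading the count off the stack length) with a stack-free left-to-right formulation: for each position a forward scan of the suffix keeps a running maximum and counts the strictly increasing records above arr[i]; it trades the O(n) stack pass for a quadratic but plainer double loop.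
import Mathlib
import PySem

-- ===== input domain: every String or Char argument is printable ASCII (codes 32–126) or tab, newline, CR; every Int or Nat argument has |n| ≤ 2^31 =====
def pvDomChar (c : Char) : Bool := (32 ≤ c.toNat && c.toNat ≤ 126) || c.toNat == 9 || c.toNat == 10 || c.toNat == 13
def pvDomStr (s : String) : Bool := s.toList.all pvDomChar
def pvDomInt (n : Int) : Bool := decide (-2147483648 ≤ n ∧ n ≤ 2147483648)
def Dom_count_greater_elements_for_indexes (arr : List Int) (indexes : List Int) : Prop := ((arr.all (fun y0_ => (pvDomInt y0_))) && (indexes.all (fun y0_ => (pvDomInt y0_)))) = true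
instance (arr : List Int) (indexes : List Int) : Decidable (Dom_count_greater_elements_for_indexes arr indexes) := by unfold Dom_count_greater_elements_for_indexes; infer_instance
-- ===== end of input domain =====

-- B replaces A's right-to-left monotonic stack by a stack-free per-index forward scan
-- with a running maximum (objective: alternative decomposition, not faster).


-- ===== PORT A =====
-- 'while stack and stack[-1] <= arr[i]: stack.pop()'  (stack head = Python stack top)
def popLE : List Int → Int → List Int
  | [], _ => []
  | x :: s, v => if x ≤ v then popLE s v else x :: s

-- 'for i in range(len(arr)-1, -1, -1)': recursion processing i = k-1, ..., 0;
-- state = (stack, result).  arr[i] is always in range here, so pyGet? … |>.getD 0 is exact.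
def loopA (arr : List Int) : Nat → List Int × List Int → List Int × List Int
  | 0, st => st
  | k + 1, st =>
    let v := (PySem.List.pyGet? arr (k : Int)).getD 0
    let stack := popLE st.1 v
    let count : Int := stack.length
    let result := st.2.set k count
    loopA arr k (v :: stack, result)

def count_greater_elements_for_indexes (arr : List Int) (indexes : List Int) : List Int :=
  let st := loopA arr arr.length ([], List.replicate arr.length 0)
  -- '[result[i] for i in indexes]'; Pre_ guarantees every i is in range, so getD 0 is exact
  indexes.map (fun i => (PySem.List.pyGet? st.2 i).getD 0)

-- ===== PORT B =====
def count_greater_elements_for_indexes_alt (arr : List Int) (indexes : List Int) : List Int :=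
  let result := (PySem.List.pyRange 0 arr.length 1).foldl (fun res i =>
    let m := (PySem.List.pyGet? arr i).getD 0          -- arr[i], i in range
    let p := (PySem.List.slice arr (some (i + 1)) none).foldl
      (fun (mc : Int × Int) x => if mc.1 < x then (x, mc.2 + 1) else mc) (m, 0)
    res ++ [p.2]) []
  indexes.map (fun i => (PySem.List.pyGet? result i).getD 0)

-- ===== PRECONDITION & SPEC =====
-- Pre_ excludes exactly the inputs where Python raises IndexError: some i in indexes
-- outside [-len(arr), len(arr)-1] (both A and B raise there).
def Pre_count_greater_elements_for_indexes (arr : List Int) (indexes : List Int) : Prop :=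
  ∀ i ∈ indexes, PySem.Raise.InRange arr.length i
instance (arr : List Int) (indexes : List Int) : Decidable (Pre_count_greater_elements_for_indexes arr indexes) := by unfold Pre_count_greater_elements_for_indexes; infer_instance
def pvWitness_count_greater_elements_for_indexes : List Int × List Int := ([3, 1, 2], [0, -1])

def Spec_count_greater_elements_for_indexes (arr : List Int) (indexes : List Int) (out : List Int) : Prop := out = count_greater_elements_for_indexes_alt arr indexes
instance (arr : List Int) (indexes : List Int) (out : List Int) : Decidable (Spec_count_greater_elements_for_indexes arr indexes out) := by unfold Spec_count_greater_elements_for_indexes; infer_instance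

-- ===== CLAIM (what is proved, stated in full; the proofs are below) =====
def Claim_equal_count_greater_elements_for_indexes : Prop := ∀ (arr : List Int) (indexes : List Int), Dom_count_greater_elements_for_indexes arr indexes → Pre_count_greater_elements_for_indexes arr indexes → Spec_count_greater_elements_for_indexes arr indexes (count_greater_elements_for_indexes arr indexes)

-- ===== LEMMAS AND PROOFS =====

-- the monotonic stack after processing a suffix right-to-left
def recs : List Int → List Int
  | [] => []
  | x :: t => x :: popLE (recs t) x

-- the value A stores at position j
def cnt (arr : List Int) (j : Nat) : Int := ((popLE (recs (arr.drop (j + 1))) (arr.getD j 0)).length : Int)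

theorem popLE_popLE (s : List Int) (x m : Int) (h : x ≤ m) :
    popLE (popLE s x) m = popLE s m := by
  induction s with
  | nil => simp [popLE]
  | cons y t ih =>
    by_cases hy : y ≤ x
    · simp [popLE, hy, ih, le_trans hy h]
    · by_cases hm : y ≤ m <;> simp [popLE, hy, hm]

theorem foldB_snd (l : List Int) : ∀ (m c : Int),
    (l.foldl (fun (mc : Int × Int) x => if mc.1 < x then (x, mc.2 + 1) else mc) (m, c)).2
      = c + ((popLE (recs l) m).length : Int) := by
  induction l with
  | nil => intro m c; simp [recs, popLE]
  | cons x t ih =>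
    intro m c
    by_cases h : m < x
    · simp [List.foldl_cons, h, ih, recs, popLE, not_le.mpr h]
      ring
    · simp [List.foldl_cons, h, ih, recs, popLE, not_lt.mp h,
        popLE_popLE (recs t) x m (not_lt.mp h)]

theorem drop_set_cons (res : List Int) (k : Nat) (c : Int) (h : k < res.length) :
    (res.set k c).drop k = c :: res.drop (k + 1) := by
  rw [List.drop_set]
  simp only [lt_irrefl, Nat.sub_self]
  rw [show List.drop k res = res[k] :: List.drop (k + 1) res from (List.getElem_cons_drop h).symm]
  rfl

theorem loopA_spec (arr : List Int) : ∀ (k : Nat), k ≤ arr.length →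
    ∀ res : List Int, res.length = arr.length →
    (loopA arr k (recs (arr.drop k), res)).2
      = (List.range k).map (cnt arr) ++ res.drop k := by
  intro k
  induction k with
  | zero => intro _ res _; simp [loopA]
  | succ k ih =>
    intro hk res hres
    have hklt : k < arr.length := by omega
    have hv : (PySem.List.pyGet? arr (k : Int)).getD 0 = arr.getD k 0 := by
      simp [PySem.List.pyGet?_natCast, List.getD]
    have hdrop : arr.drop k = arr.getD k 0 :: arr.drop (k + 1) := by
      rw [List.getD_eq_getElem _ _ hklt]
      exact (List.getElem_cons_drop hklt).symm
    have hrecs : recs (arr.drop k)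
        = arr.getD k 0 :: popLE (recs (arr.drop (k + 1))) (arr.getD k 0) := by
      rw [hdrop]; rfl
    show (loopA arr (k+1) (recs (arr.drop (k+1)), res)).2 = _
    rw [loopA]
    simp only [hv]
    rw [← hrecs]
    rw [ih (by omega) _ (by simpa using hres)]
    rw [drop_set_cons res k _ (by omega)]
    simp [List.range_succ, cnt]

theorem resultA_eq (arr : List Int) :
    (loopA arr arr.length ([], List.replicate arr.length 0)).2
      = (List.range arr.length).map (cnt arr) := by
  have h0 : recs (arr.drop arr.length) = [] := by simp [recs]
  have := loopA_spec arr arr.length le_rfl (List.replicate arr.length 0) (by simp)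
  rw [h0] at this
  simpa using this

theorem resultB_eq (arr : List Int) :
    (PySem.List.pyRange 0 arr.length 1).foldl (fun res i =>
        let m := (PySem.List.pyGet? arr i).getD 0
        let p := (PySem.List.slice arr (some (i + 1)) none).foldl
          (fun (mc : Int × Int) x => if mc.1 < x then (x, mc.2 + 1) else mc) (m, 0)
        res ++ [p.2]) []
      = (List.range arr.length).map (cnt arr) := by
  rw [PySem.List.foldl_append_singleton_eq_map]
  rw [PySem.List.pyRange_one 0 arr.length]
  simp only [Int.sub_zero, Int.toNat_natCast, List.map_map]
  apply List.map_congr_left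
  intro j hj
  have hjlt : j < arr.length := List.mem_range.mp hj
  simp only [Function.comp, Int.zero_add]
  have hsl : PySem.List.slice arr (some ((j : Int) + 1)) none = arr.drop (j + 1) := by
    have : ((j : Int) + 1) = ((j + 1 : Nat) : Int) := by push_cast; ring
    rw [this, PySem.List.slice_from_natCast]
  rw [hsl]
  have hv : (PySem.List.pyGet? arr (j : Int)).getD 0 = arr.getD j 0 := by
    simp [PySem.List.pyGet?_natCast, List.getD]
  rw [hv, foldB_snd]
  simp [cnt]

-- ===== VERDICT (by name: the statement is the Claim_ definition above) =====
theorem count_greater_elements_for_indexes_spec : Claim_equal_count_greater_elements_for_indexes := by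
  intro arr indexes _ _
  unfold Spec_count_greater_elements_for_indexes
  simp only [count_greater_elements_for_indexes, count_greater_elements_for_indexes_alt]
  rw [resultA_eq, resultB_eq]
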